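-- pv_equiv track=rewrite | github.com/MrBrantCode/unitest_baseline | mut_generate/mist_train_taco/taco_9662/solution.py | is_prime_happy
-- ===== SOURCE A (Python) =====
-- def is_prime_happy(n):
--     if n <= 2:
--         return False
--
--     def is_prime(num):
--         if num <= 1:
--             return False
--         if num <= 3:
--             return True
--         if num % 2 == 0 or num % 3 == 0:
--             return False
--         i = 5
--         while i * i <= num:
--             if num % i == 0 or num % (i + 2) == 0:
--                 return False
--             i += 6
--         return True
--
--     prime_sum = 0
--     for i in range(2, n):
--         if is_prime(i):
--             prime_sum += i
--
--     return prime_sum % n == 0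
-- ===== SOURCE B (Python) =====
-- def is_prime_happy(n):
--     if n <= 2:
--         return False
--     sieve = [True] * n
--     sieve[0] = False
--     sieve[1] = False
--     p = 2
--     while p * p < n:
--         if sieve[p]:
--             for m in range(p * p, n, p):
--                 sieve[m] = False
--         p += 1
--     total = 0
--     for i in range(n):
--         if sieve[i]:
--             total += i
--     return total % n == 0
-- ===== Notes on version B (the rewrite author's own statement) =====
-- stated objective: faster
-- what changed: Replaces the per-number 6k±1 trial-division primality test with a Sieve of Eratosthenes over [0,n) followed by one summing pass.
import Mathlib
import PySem

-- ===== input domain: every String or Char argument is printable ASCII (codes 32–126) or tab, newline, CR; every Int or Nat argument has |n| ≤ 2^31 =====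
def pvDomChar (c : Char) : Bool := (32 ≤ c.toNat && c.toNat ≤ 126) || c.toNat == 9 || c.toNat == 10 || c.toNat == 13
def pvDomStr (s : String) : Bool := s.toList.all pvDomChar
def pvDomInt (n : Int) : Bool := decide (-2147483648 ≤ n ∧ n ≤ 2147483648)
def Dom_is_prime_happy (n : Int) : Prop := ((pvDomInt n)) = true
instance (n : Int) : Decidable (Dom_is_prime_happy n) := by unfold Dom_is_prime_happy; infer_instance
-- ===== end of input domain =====

-- B replaces A's per-number 6k±1 trial-division primality test by a Sieve of Eratosthenes plus one summing pass (measured faster).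

-- ===== PORT A =====
-- the 'while i * i <= num' loop inside A's inner helper is_prime
def pvIsPrimeLoop (num : Int) (i : Int) : Bool :=
  if h : i * i ≤ num then
    if PySem.Int.mod num i == 0 || PySem.Int.mod num (i + 2) == 0 then false
    else pvIsPrimeLoop num (i + 6)
  else true
termination_by (num + 1 - i).toNat
decreasing_by
  have h1 : i ≤ i * i := by nlinarith [sq_nonneg i, sq_nonneg (i - 1)]
  omega

-- A's inner helper is_prime
def pvIsPrime (num : Int) : Bool :=
  if num ≤ 1 then false
  else if num ≤ 3 then true
  else if PySem.Int.mod num 2 == 0 || PySem.Int.mod num 3 == 0 then false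
  else pvIsPrimeLoop num 5

def is_prime_happy (n : Int) : Bool :=
  if n ≤ 2 then false
  else
    let prime_sum := (PySem.List.pyRange 2 n 1).foldl
      (fun acc i => if pvIsPrime i then acc + i else acc) 0
    PySem.Int.mod prime_sum n == 0

-- ===== PORT B =====
-- the inner 'for m in range(p*p, n, p): sieve[m] = False', started at m = p*p
def pvMark (s : Array Bool) (m n p : Nat) : Array Bool :=
  if _h : 0 < p ∧ m < n then pvMark (s.setIfInBounds m false) (m + p) n p else s
termination_by n - m
decreasing_by omega

-- the 'while p * p < n' loop
def pvSieveLoop (n p : Nat) (s : Array Bool) : Array Bool :=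
  if _h : p * p < n then
    pvSieveLoop n (p + 1) (if s.getD p false then pvMark s (p * p) n p else s)
  else s
termination_by n - p
decreasing_by
  rcases Nat.eq_zero_or_pos p with hp | hp
  · omega
  · have : p ≤ p * p := Nat.le_mul_of_pos_left p hp
    omega

def is_prime_happy_alt (n : Int) : Bool :=
  if n ≤ 2 then false
  else
    let N := n.toNat
    let sieve := pvSieveLoop N 2 (((Array.replicate N true).setIfInBounds 0 false).setIfInBounds 1 false)
    let total := (List.range N).foldl
      (fun acc i => if sieve.getD i false then acc + i else acc) 0
    total % N == 0

-- ===== PRECONDITION & SPEC =====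
def Spec_is_prime_happy (n : Int) (out : Bool) : Prop := out = is_prime_happy_alt n
instance (n : Int) (out : Bool) : Decidable (Spec_is_prime_happy n out) := by unfold Spec_is_prime_happy; infer_instance

-- ===== CLAIM (what is proved, stated in full; the proofs are below) =====
def Claim_equal_is_prime_happy : Prop := ∀ (n : Int), Dom_is_prime_happy n → Spec_is_prime_happy n (is_prime_happy n)

-- ===== LEMMAS AND PROOFS =====

theorem pvIsPrimeLoop_eq_true (num i : Int) (hi : 0 ≤ i) :
    pvIsPrimeLoop num i = true ↔
      ∀ k : Nat, (i + 6*k) * (i + 6*k) ≤ num →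
        ¬ (i + 6*k) ∣ num ∧ ¬ (i + 6*k + 2) ∣ num := by
  induction i using pvIsPrimeLoop.induct (num := num) with
  | case1 i h hdiv =>
    rw [pvIsPrimeLoop, dif_pos h, if_pos hdiv]
    simp only [Bool.false_eq_true, false_iff]
    intro hall
    have h0 := hall 0 (by push_cast; simpa using h)
    rw [Bool.or_eq_true, beq_iff_eq, beq_iff_eq,
        PySem.Int.mod_eq_zero_iff_dvd, PySem.Int.mod_eq_zero_iff_dvd] at hdiv
    push_cast at h0
    simp only [add_zero] at h0
    tauto
  | case2 i h hdiv ih =>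
    rw [pvIsPrimeLoop, dif_pos h, if_neg hdiv]
    rw [Bool.or_eq_true, beq_iff_eq, beq_iff_eq,
        PySem.Int.mod_eq_zero_iff_dvd, PySem.Int.mod_eq_zero_iff_dvd] at hdiv
    push Not at hdiv
    rw [ih (by omega)]
    have hshift : ∀ j : Nat, i + 6*((j:Int)+1) = (i + 6) + 6*(j:Int) := by intro j; ring
    constructor
    · intro hall k hk
      rcases Nat.eq_zero_or_pos k with rfl | hkpos
      · push_cast at hk ⊢
        simpa using hdiv
      · obtain ⟨j, rfl⟩ : ∃ j, k = j + 1 := ⟨k - 1, by omega⟩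
        have := hall j
        push_cast at hk this ⊢
        ring_nf at hk this ⊢
        exact this hk
    · intro hall k hk
      have := hall (k+1)
      push_cast at hk this ⊢
      ring_nf at hk this ⊢
      exact this hk
  | case3 i h =>
    rw [pvIsPrimeLoop, dif_neg h]
    simp only [true_iff]
    intro k hk
    exfalso
    have hk0 : (0:Int) ≤ 6*k := by positivity
    nlinarith

theorem prime_mod_six (q : Nat) (hq : q.Prime) (h5 : 5 ≤ q) : q % 6 = 1 ∨ q % 6 = 5 := by
  have h2 : ¬ 2 ∣ q := fun h => by rcases (hq.eq_one_or_self_of_dvd 2 h) with h' | h' <;> omega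
  have h3 : ¬ 3 ∣ q := fun h => by rcases (hq.eq_one_or_self_of_dvd 3 h) with h' | h' <;> omega
  omega

theorem pvIsPrime_iff (num : Int) (h2 : 2 ≤ num) :
    pvIsPrime num = true ↔ Nat.Prime num.toNat := by
  obtain ⟨p, rfl⟩ : ∃ p : Nat, num = (p : Int) := ⟨num.toNat, by omega⟩
  have hp2 : 2 ≤ p := by exact_mod_cast h2
  rw [Int.toNat_natCast]
  unfold pvIsPrime
  rcases le_or_gt (p : Int) 1 with h | h
  · omega
  rw [if_neg (by omega)]
  rcases le_or_gt (p : Int) 3 with h3 | h3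
  · rw [if_pos h3]
    have : p = 2 ∨ p = 3 := by omega
    rcases this with rfl | rfl
    · simpa using Nat.prime_two
    · simpa using Nat.prime_three
  rw [if_neg (by omega)]
  have hp4 : 4 ≤ p := by omega
  by_cases hdiv : ((2:Int) ∣ (p:Int)) ∨ ((3:Int) ∣ (p:Int))
  · rw [if_pos (by
      rw [Bool.or_eq_true, beq_iff_eq, beq_iff_eq,
          PySem.Int.mod_eq_zero_iff_dvd, PySem.Int.mod_eq_zero_iff_dvd]
      exact hdiv)]
    simp only [Bool.false_eq_true, false_iff]
    intro hpr
    have hd : (2 ∣ p) ∨ (3 ∣ p) := by exact_mod_cast hdiv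
    rcases hd with hd | hd
    · rcases hpr.eq_one_or_self_of_dvd 2 hd with h' | h' <;> omega
    · rcases hpr.eq_one_or_self_of_dvd 3 hd with h' | h' <;> omega
  · rw [if_neg (by
      rw [Bool.or_eq_true, beq_iff_eq, beq_iff_eq,
          PySem.Int.mod_eq_zero_iff_dvd, PySem.Int.mod_eq_zero_iff_dvd]
      exact hdiv)]
    push Not at hdiv
    have hnd : ¬ (2 ∣ p) ∧ ¬ (3 ∣ p) :=
      ⟨fun hd => hdiv.1 (by exact_mod_cast hd), fun hd => hdiv.2 (by exact_mod_cast hd)⟩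
    have hp5 : 5 ≤ p := by omega
    rw [pvIsPrimeLoop_eq_true _ _ (by norm_num)]
    constructor
    · intro hall
      by_contra hnp
      obtain ⟨q, hqd, hq, hqsq⟩ : ∃ q, q ∣ p ∧ q.Prime ∧ q * q ≤ p :=
        ⟨p.minFac, Nat.minFac_dvd p, Nat.minFac_prime (by omega),
          by nlinarith [Nat.minFac_sq_le_self (n := p) (by omega) hnp]⟩
      have hq2 : 2 ≤ q := hq.two_le
      have hqne2 : q ≠ 2 := fun h => hnd.1 (h ▸ hqd)
      have hqne3 : q ≠ 3 := fun h => hnd.2 (h ▸ hqd)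
      have hqne4 : q ≠ 4 := by rintro rfl; norm_num at hq
      have hq5 : 5 ≤ q := by omega
      rcases prime_mod_six q hq hq5 with hm | hm
      · obtain ⟨k, rfl⟩ : ∃ k, q = 5 + 6 * k + 2 := ⟨(q - 7) / 6, by omega⟩
        have := hall k (by nlinarith)
        exact this.2 (by exact_mod_cast hqd)
      · obtain ⟨k, rfl⟩ : ∃ k, q = 5 + 6 * k := ⟨(q - 5) / 6, by omega⟩
        have := hall k (by nlinarith)
        exact this.1 (by exact_mod_cast hqd)
    · intro hpr k hk
      have hk' : (5 + 6*k) * (5 + 6*k) ≤ p := by exact_mod_cast hk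
      constructor
      · intro hd
        have hd' : (5 + 6*k) ∣ p := by exact_mod_cast hd
        rcases hpr.eq_one_or_self_of_dvd _ hd' with h' | h' <;> nlinarith
      · intro hd
        have hd' : (5 + 6*k + 2) ∣ p := by exact_mod_cast hd
        rcases hpr.eq_one_or_self_of_dvd _ hd' with h' | h' <;> nlinarith

-- B side proof helpers: a list model of the array sieve
def pvNatRange (a n p : Nat) : List Nat :=
  if _h : 0 < p ∧ a < n then a :: pvNatRange (a + p) n p else []
termination_by n - a
decreasing_by omega

def pvMarkL (s : List Bool) (m n p : Nat) : List Bool :=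
  (pvNatRange m n p).foldl (fun t j => t.set j false) s

def pvSieveLoopL (n p : Nat) (s : List Bool) : List Bool :=
  if _h : p * p < n then
    pvSieveLoopL n (p + 1) (if s.getD p false then pvMarkL s (p * p) n p else s)
  else s
termination_by n - p
decreasing_by
  rcases Nat.eq_zero_or_pos p with hp | hp
  · omega
  · have : p ≤ p * p := Nat.le_mul_of_pos_left p hp
    omega

theorem pvArrGetD (a : Array Bool) (i : Nat) (d : Bool) : a.getD i d = a.toList.getD i d := by
  unfold Array.getD
  split
  · rw [List.getD_eq_getElem?_getD, Array.getElem?_toList, Array.getElem?_eq_getElem (by assumption)]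
    rfl
  · rw [List.getD_eq_getElem?_getD, Array.getElem?_toList, Array.getElem?_eq_none (by omega)]
    rfl

theorem toList_pvMark (s : Array Bool) (m n p : Nat) :
    (pvMark s m n p).toList = pvMarkL s.toList m n p := by
  induction s, m using pvMark.induct (n := n) (p := p) with
  | case1 s m h ih =>
    rw [pvMark, dif_pos h, ih, Array.toList_setIfInBounds]
    conv_rhs => rw [pvMarkL, pvNatRange, dif_pos h, List.foldl_cons]
    rfl
  | case2 s m h =>
    rw [pvMark, dif_neg h]
    conv_rhs => rw [pvMarkL, pvNatRange, dif_neg h, List.foldl_nil]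

theorem toList_pvSieveLoop (n p : Nat) (s : Array Bool) :
    (pvSieveLoop n p s).toList = pvSieveLoopL n p s.toList := by
  induction p, s using pvSieveLoop.induct (n := n) with
  | case1 p s h ih =>
    by_cases hb : s.getD p false = true
    · rw [dif_pos hb] at ih
      rw [pvSieveLoop, dif_pos h, if_pos hb, ih, toList_pvMark]
      conv_rhs => rw [pvSieveLoopL, dif_pos h]
      rw [← pvArrGetD, if_pos hb]
    · rw [dif_neg hb] at ih
      rw [pvSieveLoop, dif_pos h, if_neg hb, ih]
      conv_rhs => rw [pvSieveLoopL, dif_pos h]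
      rw [← pvArrGetD, if_neg hb]
  | case2 p s h =>
    rw [pvSieveLoop, dif_neg h, pvSieveLoopL, dif_neg h]

theorem mem_pvNatRange (a n p m : Nat) :
    m ∈ pvNatRange a n p ↔ 0 < p ∧ m < n ∧ ∃ k, m = a + p * k := by
  induction a using pvNatRange.induct (n := n) (p := p) with
  | case1 a h ih =>
    rw [pvNatRange, dif_pos h, List.mem_cons, ih]
    constructor
    · rintro (rfl | ⟨hp, hm, k, rfl⟩)
      · exact ⟨h.1, h.2, 0, by ring⟩
      · exact ⟨hp, hm, k + 1, by ring⟩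
    · rintro ⟨hp, hm, k, rfl⟩
      rcases Nat.eq_zero_or_pos k with rfl | hk
      · left; ring
      · right
        obtain ⟨j, rfl⟩ : ∃ j, k = j + 1 := ⟨k - 1, by omega⟩
        exact ⟨hp, hm, j, by rw [Nat.mul_succ]; omega⟩
  | case2 a h =>
    rw [pvNatRange, dif_neg h]
    simp only [List.not_mem_nil, false_iff]
    rintro ⟨hp, hm, k, rfl⟩
    exact h ⟨hp, by nlinarith⟩

theorem foldl_set_length (l : List Nat) (s : List Bool) :
    (l.foldl (fun t m => t.set m false) s).length = s.length := by
  induction l generalizing s with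
  | nil => rfl
  | cons x l ih => simpa [List.foldl_cons] using ih (s.set x false)

theorem length_pvMarkL (s : List Bool) (m n p : Nat) : (pvMarkL s m n p).length = s.length :=
  foldl_set_length _ s

theorem foldl_set_getD (l : List Nat) (s : List Bool) (i : Nat) :
    (l.foldl (fun t m => t.set m false) s).getD i false =
      if i ∈ l ∧ i < s.length then false else s.getD i false := by
  induction l generalizing s with
  | nil => simp
  | cons x l ih =>
    rw [List.foldl_cons, ih]
    simp only [List.getD_eq_getElem?_getD, List.getElem?_set, List.length_set, List.mem_cons]
    by_cases hx : i = x
    · subst hx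
      by_cases hlt : i < s.length <;> split_ifs <;> simp_all
    · split_ifs <;> simp_all

theorem getD_pvMarkL (s : List Bool) (m n p i : Nat) (hlen : s.length = n) :
    (pvMarkL s m n p).getD i false =
      if i ∈ pvNatRange m n p then false else s.getD i false := by
  unfold pvMarkL
  rw [foldl_set_getD]
  by_cases hm : i ∈ pvNatRange m n p
  · rw [if_pos ⟨hm, by rw [hlen]; exact ((mem_pvNatRange _ _ _ _).mp hm).2.1⟩, if_pos hm]
  · rw [if_neg (fun h => hm h.1), if_neg hm]

theorem mem_pvNatRange_sq (p n i : Nat) (hp : 2 ≤ p) :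
    i ∈ pvNatRange (p * p) n p ↔ i < n ∧ p ∣ i ∧ p * p ≤ i := by
  rw [mem_pvNatRange]
  constructor
  · rintro ⟨-, hi, k, rfl⟩
    exact ⟨hi, ⟨p + k, by ring⟩, by omega⟩
  · rintro ⟨hi, ⟨j, rfl⟩, hsq⟩
    have hj : p ≤ j := by nlinarith
    exact ⟨by omega, hi, j - p, by
      have : p * (j - p) = p * j - p * p := by rw [Nat.mul_sub]
      omega⟩

theorem Qp_iff_prime (i p n : Nat) (hi : i < n) (hnp : n ≤ p * p) :
    (2 ≤ i ∧ ∀ q, 2 ≤ q → q < p → q * q ≤ i → ¬ q ∣ i) ↔ Nat.Prime i := by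
  constructor
  · rintro ⟨h2, hq⟩
    rw [Nat.prime_def_le_sqrt]
    refine ⟨h2, fun m hm hms => hq m hm ?_ (Nat.le_sqrt.mp hms)⟩
    have h' := Nat.le_sqrt.mp hms
    nlinarith
  · intro hpr
    refine ⟨hpr.two_le, fun q h2q hqp hqq hdvd => ?_⟩
    rcases hpr.eq_one_or_self_of_dvd q hdvd with h | h <;> nlinarith [hpr.two_le]

theorem pvSieveLoopL_getD (n p : Nat) (s : List Bool) :
    2 ≤ p → s.length = n →
    (∀ i, s.getD i false = true ↔
      i < n ∧ 2 ≤ i ∧ ∀ q, 2 ≤ q → q < p → q * q ≤ i → ¬ q ∣ i) →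
    ∀ i, (pvSieveLoopL n p s).getD i false = true ↔ i < n ∧ Nat.Prime i := by
  induction p, s using pvSieveLoopL.induct (n := n) with
  | case1 p s h ih =>
    intro hp hlen hinv
    rw [pvSieveLoopL, dif_pos h]
    have hpn : p < n := by nlinarith
    apply ih
    · omega
    · by_cases hb : s.getD p false = true
      · rw [dif_pos hb, length_pvMarkL]; exact hlen
      · rwa [dif_neg hb]
    · intro i
      by_cases hb : s.getD p false = true
      · rw [dif_pos hb, getD_pvMarkL s (p * p) n p i hlen]
        by_cases hmem : i < n ∧ p ∣ i ∧ p * p ≤ i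
        · rw [if_pos ((mem_pvNatRange_sq p n i hp).mpr hmem)]
          simp only [Bool.false_eq_true, false_iff]
          rintro ⟨hi, h2, hq⟩
          exact hq p (by omega) (by omega) hmem.2.2 hmem.2.1
        · rw [if_neg (fun hc => hmem ((mem_pvNatRange_sq p n i hp).mp hc)), hinv i]
          constructor
          · rintro ⟨hi, h2, hq⟩
            refine ⟨hi, h2, fun q h2q hqp1 hqq hdvd => ?_⟩
            rcases Nat.lt_or_ge q p with hqp | hqp
            · exact hq q h2q hqp hqq hdvd
            · have hqe : q = p := by omega
              subst hqe
              exact hmem ⟨hi, hdvd, hqq⟩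
          · rintro ⟨hi, h2, hq⟩
            exact ⟨hi, h2, fun q h2q hqp hqq => hq q h2q (by omega) hqq⟩
      · rw [dif_neg hb]
        have hnotQ : ¬ ∀ q, 2 ≤ q → q < p → q * q ≤ p → ¬ q ∣ p := by
          intro hall
          exact hb ((hinv p).mpr ⟨hpn, hp, hall⟩)
        push Not at hnotQ
        obtain ⟨r, hr2, hrp, hrsq, hrd⟩ := hnotQ
        rw [hinv i]
        constructor
        · rintro ⟨hi, h2, hq⟩
          refine ⟨hi, h2, fun q h2q hqp1 hqq hdvd => ?_⟩
          rcases Nat.lt_or_ge q p with hqp | hqp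
          · exact hq q h2q hqp hqq hdvd
          · have hqe : q = p := by omega
            subst hqe
            exact hq r hr2 hrp (by nlinarith) (hrd.trans hdvd)
        · rintro ⟨hi, h2, hq⟩
          exact ⟨hi, h2, fun q h2q hqp hqq => hq q h2q (by omega) hqq⟩
  | case2 p s h =>
    intro hp hlen hinv i
    rw [pvSieveLoopL, dif_neg h]
    rw [hinv i]
    constructor
    · rintro ⟨hi, hq⟩
      exact ⟨hi, (Qp_iff_prime i p n hi (by omega)).mp hq⟩
    · rintro ⟨hi, hpr⟩
      exact ⟨hi, (Qp_iff_prime i p n hi (by omega)).mpr hpr⟩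

theorem foldl_ite_add {M : Type} [AddCommMonoid M] (l : List M) (c : M → Bool) (init : M) :
    l.foldl (fun acc i => if c i then acc + i else acc) init
      = init + (l.map (fun i => if c i then i else 0)).sum := by
  induction l generalizing init with
  | nil => simp
  | cons x l ih =>
    rw [List.foldl_cons, ih, List.map_cons, List.sum_cons]
    by_cases hc : c x
    · rw [if_pos hc, if_pos hc, add_assoc]
    · rw [if_neg hc, if_neg hc, zero_add]

theorem sum_map_cast (l : List Nat) (f : Nat → Nat) :
    (l.map (fun k => ((f k : Nat) : Int))).sum = ((l.map f).sum : Int) := by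
  induction l with
  | nil => simp
  | cons x l ih => push_cast; simp [ih]

-- initial sieve contents

theorem init_sieve_getD (N i : Nat) :
    (((List.replicate N true).set 0 false).set 1 false).getD i false = true ↔
      i < N ∧ 2 ≤ i ∧ ∀ q, 2 ≤ q → q < 2 → q * q ≤ i → ¬ q ∣ i := by
  have hv : ∀ q, 2 ≤ q → q < 2 → q * q ≤ i → ¬ q ∣ i := by omega
  simp only [List.getD_eq_getElem?_getD, List.getElem?_set, List.length_set,
    List.length_replicate, List.getElem?_replicate]
  split_ifs <;> simp_all <;> omega

theorem is_prime_happy_eq (n : Int) : is_prime_happy n = is_prime_happy_alt n := by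
  by_cases h : n ≤ 2
  · simp only [is_prime_happy, is_prime_happy_alt, if_pos h]
  · simp only [is_prime_happy, is_prime_happy_alt, if_neg h]
    simp only [pvArrGetD, toList_pvSieveLoop, Array.toList_setIfInBounds, Array.toList_replicate]
    obtain ⟨N, rfl⟩ : ∃ N : Nat, n = (N : Int) := ⟨n.toNat, by omega⟩
    have hN : 3 ≤ N := by omega
    rw [Int.toNat_natCast]
    have hsieve := pvSieveLoopL_getD N 2 (((List.replicate N true).set 0 false).set 1 false)
      (le_refl 2) (by simp) (init_sieve_getD N)
    set sieve := pvSieveLoopL N 2 (((List.replicate N true).set 0 false).set 1 false) with hs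
    rw [foldl_ite_add, foldl_ite_add, zero_add, zero_add]
    have hnot : ∀ i, ¬ (i < N ∧ Nat.Prime i) → sieve.getD i false = false := by
      intro i hi
      rw [← Bool.not_eq_true, hsieve i]
      exact hi
    have e0 : sieve.getD 0 false = false := hnot 0 (by simp [Nat.not_prime_zero])
    have e1 : sieve.getD 1 false = false := hnot 1 (by simp [Nat.not_prime_one])
    -- A's sum over pyRange 2 N, reindexed over range (N-2)
    rw [PySem.List.pyRange_one, show (((N:Int)) - 2).toNat = N - 2 from by omega,
      List.map_map]
    rw [List.map_congr_left (l := List.range (N - 2))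
      (f := (fun i => if pvIsPrime i then i else 0) ∘ (fun k : Nat => (2:Int) + ↑k))
      (g := fun k : Nat => ((if Nat.Prime (2 + k) then 2 + k else 0 : Nat) : Int))
      (by
        intro k hk
        simp only [Function.comp_apply]
        have h2k : ((2:Int) + ↑k).toNat = 2 + k := by omega
        by_cases hp : Nat.Prime (2 + k)
        · rw [if_pos (by rw [pvIsPrime_iff _ (by omega), h2k]; exact hp), if_pos hp]
          push_cast
          ring
        · rw [if_neg (fun hc => hp (h2k ▸ (pvIsPrime_iff _ (by omega)).mp hc)), if_neg hp]
          simp)]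
    -- B's sum over range N: split off indices 0 and 1
    conv_rhs => rw [show List.range N = List.range 2 ++ (List.range (N - 2)).map (2 + ·) from by
      rw [← List.range_add]; congr 1; omega]
    rw [List.map_append, List.sum_append]
    rw [show ((List.range 2).map (fun i => if sieve.getD i false then i else 0)) = [0, 0] from by
      rw [show List.range 2 = [0, 1] from rfl]
      simp only [List.map_cons, List.map_nil, e0, e1, Bool.false_eq_true, if_false]]
    rw [show ([0, 0] : List Nat).sum = 0 from rfl, zero_add, List.map_map]
    rw [List.map_congr_left (l := List.range (N - 2))
      (f := (fun i => if sieve.getD i false then i else 0) ∘ (fun x : Nat => 2 + x))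
      (g := fun k : Nat => if Nat.Prime (2 + k) then 2 + k else 0)
      (by
        intro k hk
        simp only [Function.comp_apply]
        have hkN : 2 + k < N := by
          have := List.mem_range.mp hk
          omega
        by_cases hp : Nat.Prime (2 + k)
        · rw [if_pos ((hsieve (2 + k)).mpr ⟨hkN, hp⟩), if_pos hp]
        · rw [hnot (2 + k) (fun hc => hp hc.2), if_neg hp]
          simp)]
    -- both sums are now the same Nat sum; finish through the casts
    rw [sum_map_cast, PySem.Int.mod_natCast]
    refine Bool.eq_iff_iff.mpr ?_
    simp only [beq_iff_eq, Nat.cast_eq_zero]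


-- ===== VERDICT (by name: the statement is the Claim_ definition above) =====
theorem is_prime_happy_spec : Claim_equal_is_prime_happy := by
  intro n _
  unfold Spec_is_prime_happy
  exact is_prime_happy_eq n
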